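-- pv_equiv track=rewrite | github.com/prprhyt/tweet-detect-doc2vec | doc2vec.py | trim_doc
-- ===== SOURCE A (Python) =====
-- def trim_doc(doc):
--     lines = doc.splitlines()
--     valid_lines = []
--     is_valid = False
--     horizontal_rule_cnt = 0
--     break_cnt = 0
--     for line in lines:
--         if horizontal_rule_cnt < 2 and '-----' in line:
--             horizontal_rule_cnt += 1
--             is_valid = horizontal_rule_cnt == 2
--             continue
--         if not(is_valid):
--             continue
--         if line == '':
--             break_cnt += 1
--             is_valid = break_cnt != 3
--             continue
--         break_cnt = 0
--         valid_lines.append(line)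
--     return ''.join(valid_lines)
-- ===== SOURCE B (Python) =====
-- def trim_doc(doc):
--     lines = doc.splitlines()
--     fences = [i for i, line in enumerate(lines) if '-----' in line]
--     if len(fences) < 2:
--         return ''
--     body = lines[fences[1] + 1:]
--     breaks = [j for j, triple in enumerate(zip(body, body[1:], body[2:])) if triple == ('', '', '')]
--     end = breaks[0] if breaks else len(body)
--     return ''.join(line for line in body[:end] if line)
-- ===== Notes on version B (the rewrite author's own statement) =====
-- stated objective: alternative
-- what changed: Replaces A's stateful single-pass scan (validity flag, fence counter, consecutive-blank counter) with a declarative comprehension/slicing computation: list all fence-line indices, slice the body after the second one, find the first blank triple by zipping the body with its own two tails, then slice to that point and filter out blank lines.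
import Mathlib
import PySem

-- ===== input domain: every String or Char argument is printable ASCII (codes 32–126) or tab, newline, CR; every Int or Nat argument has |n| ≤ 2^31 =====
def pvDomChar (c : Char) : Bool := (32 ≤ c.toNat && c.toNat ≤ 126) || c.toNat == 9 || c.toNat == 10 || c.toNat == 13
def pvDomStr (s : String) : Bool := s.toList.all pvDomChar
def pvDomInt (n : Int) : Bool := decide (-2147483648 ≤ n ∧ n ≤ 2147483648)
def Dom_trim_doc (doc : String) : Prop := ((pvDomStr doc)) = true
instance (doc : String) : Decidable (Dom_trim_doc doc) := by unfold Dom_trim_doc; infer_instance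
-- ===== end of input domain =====

-- B replaces A's stateful single-pass scan (flag + two counters) by a declarative
-- comprehension/slicing computation: list the fence indices, slice after the second,
-- locate the first blank triple by zipping the body with its own tails, slice and filter;
-- objective: alternative (same O(n) cost, genuinely different mechanism).

-- ===== PORT A =====
-- state: (valid_lines, is_valid, horizontal_rule_cnt, break_cnt), exactly A's loop
def trimLoopA : List String → List String → Bool → Int → Int → List String
  | [], acc, _, _, _ => acc
  | l :: ls, acc, v, hr, bc =>
    if hr < 2 ∧ PySem.Str.isIn "-----" l = true then
      trimLoopA ls acc (decide (hr + 1 = 2)) (hr + 1) bc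
    else if !v then
      trimLoopA ls acc v hr bc
    else if l = "" then
      trimLoopA ls acc (decide (bc + 1 ≠ 3)) hr (bc + 1)
    else
      trimLoopA ls (acc ++ [l]) v hr 0

def trim_doc (doc : String) : String :=
  PySem.Str.join "" (trimLoopA (PySem.Str.splitlines doc) [] false 0 0)

-- ===== PORT B =====
-- fences = [i for i, line in enumerate(lines) if '-----' in line]
-- breaks = [j for j, triple in enumerate(zip(body, body[1:], body[2:])) if triple == ('', '', '')]
def trim_doc_alt (doc : String) : String :=
  let lines := PySem.Str.splitlines doc
  let fences := ((PySem.List.enumerate lines 0).filter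
      (fun p => PySem.Str.isIn "-----" p.2)).map Prod.fst
  match fences with          -- 'if len(fences) < 2: return' '' together with 'fences[1]'
  | _ :: f1 :: _ =>
    let body := PySem.List.slice lines (some (f1 + 1)) none
    let breaks := ((PySem.List.enumerate
        (body.zip ((PySem.List.slice body (some 1) none).zip
                   (PySem.List.slice body (some 2) none))) 0).filter
      (fun p => decide (p.2 = ("", "", "")))).map Prod.fst
    let e : Int := match breaks with | b :: _ => b | [] => (body.length : Int)
    PySem.Str.join "" ((PySem.List.slice body none (some e)).filter (fun l => decide (l ≠ "")))
  | _ => ""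

-- ===== PRECONDITION & SPEC =====
def Spec_trim_doc (doc : String) (out : String) : Prop := out = trim_doc_alt doc
instance (doc : String) (out : String) : Decidable (Spec_trim_doc doc out) := by unfold Spec_trim_doc; infer_instance

-- ===== CLAIM (what is proved, stated in full; the proofs are below) =====
def Claim_equal_trim_doc : Prop := ∀ (doc : String), Dom_trim_doc doc → Spec_trim_doc doc (trim_doc doc)

-- ===== LEMMAS AND PROOFS =====

-- proof-side restatement of A's loop after the second fence (consecutive-blank counter)
def trimCollect : List String → List String → Int → List String
  | [], acc, _ => acc
  | l :: ls, acc, blanks =>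
    if l = "" then
      if blanks + 1 = 3 then acc else trimCollect ls acc (blanks + 1)
    else trimCollect ls (acc ++ [l]) 0

-- proof-side restatement of A's loop before the second fence
def trimFindRest : List String → Int → Option (List String)
  | [], _ => none
  | l :: ls, seen =>
    if PySem.Str.isIn "-----" l = true then
      if seen + 1 = 2 then some ls else trimFindRest ls (seen + 1)
    else trimFindRest ls seen

-- fence indices as B computes them, from an arbitrary enumerate offset
def fencesFrom (ls : List String) (k : Int) : List Int :=
  ((PySem.List.enumerate ls k).filter (fun p => PySem.Str.isIn "-----" p.2)).map Prod.fst

-- blank-triple indices as B computes them, from an arbitrary enumerate offset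
def breaksFrom (body : List String) (k : Int) : List Int :=
  ((PySem.List.enumerate (body.zip ((body.drop 1).zip (body.drop 2))) k).filter
    (fun p => decide (p.2 = ("", "", "")))).map Prod.fst

-- position of the first run of three consecutive blank lines
def firstTriple : List String → Option Nat
  | [] => none
  | l :: ls =>
    if l = "" ∧ ls.take 2 = ["", ""] then some 0
    else (firstTriple ls).map (· + 1)

theorem fencesFrom_nil (k : Int) : fencesFrom [] k = [] := rfl

theorem fencesFrom_cons (l : String) (ls : List String) (k : Int) :
    fencesFrom (l :: ls) k =
      if PySem.Str.isIn "-----" l = true then k :: fencesFrom ls (k + 1)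
      else fencesFrom ls (k + 1) := by
  simp only [fencesFrom, PySem.List.enumerate_cons, List.filter_cons]
  split_ifs with h
  · simp
  · simp

theorem fencesFrom_le (ls : List String) (k : Int) : ∀ f ∈ fencesFrom ls k, k ≤ f := by
  induction ls generalizing k with
  | nil => simp [fencesFrom_nil]
  | cons l ls ih =>
    intro f hf
    rw [fencesFrom_cons] at hf
    have step : f ∈ fencesFrom ls (k + 1) → k ≤ f := fun h => by
      have := ih (k + 1) f h; omega
    split_ifs at hf with h
    · rcases List.mem_cons.mp hf with hf | hf
      · omega
      · exact step hf
    · exact step hf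

-- once is_valid is false with horizontal_rule_cnt = 2, A's loop skips everything
theorem trimLoopA_dead (ls : List String) (acc : List String) (bc : Int) :
    trimLoopA ls acc false 2 bc = acc := by
  induction ls with
  | nil => rfl
  | cons l ls ih =>
    simp only [trimLoopA]
    split
    · omega
    · simpa using ih

-- after the second rule, A's loop is the counter loop
theorem trimLoopA_phase2 (ls : List String) (acc : List String) (bc : Int) (hbc : bc < 3) :
    trimLoopA ls acc true 2 bc = trimCollect ls acc bc := by
  induction ls generalizing acc bc with
  | nil => rfl
  | cons l ls ih =>
    simp only [trimLoopA, trimCollect]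
    split
    · omega
    · by_cases hl : l = ""
      · simp only [hl, Bool.not_true, Bool.false_eq_true, if_false]
        by_cases h3 : bc + 1 = 3
        · simp [h3, trimLoopA_dead]
        · simpa [h3] using ih acc (bc + 1) (by omega)
      · simp only [hl, Bool.not_true, Bool.false_eq_true, if_false]
        exact ih (acc ++ [l]) 0 (by omega)

-- before the second rule, A's loop is the search followed by the counter loop
theorem trimLoopA_phase1 (ls : List String) (acc : List String) (hr : Int)
    (hhr : hr = 0 ∨ hr = 1) :
    trimLoopA ls acc false hr 0 =
      match trimFindRest ls hr with
      | none => acc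
      | some rest => trimCollect rest acc 0 := by
  induction ls generalizing hr with
  | nil => rfl
  | cons l ls ih =>
    simp only [trimLoopA, trimFindRest]
    by_cases hin : PySem.Str.isIn "-----" l = true
    · rw [if_pos ⟨by omega, hin⟩, if_pos hin]
      rcases hhr with h | h
      · subst h
        rw [if_neg (by norm_num)]
        simpa using ih 1 (Or.inr rfl)
      · subst h
        rw [if_pos (by norm_num)]
        simpa using trimLoopA_phase2 ls acc 0 (by omega)
    · rw [if_neg (by tauto), if_neg hin]
      simpa using ih hr hhr

-- A's search with seen = 1 finds the first fence of the list
theorem trimFindRest_one (ls : List String) (k : Int) :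
    trimFindRest ls 1 =
      match fencesFrom ls k with
      | [] => none
      | f :: _ => some (ls.drop (f + 1 - k).toNat) := by
  induction ls generalizing k with
  | nil => rfl
  | cons l ls ih =>
    rw [fencesFrom_cons]
    simp only [trimFindRest]
    by_cases hin : PySem.Str.isIn "-----" l = true
    · simp only [hin, if_true, if_pos (show (1:Int) + 1 = 2 by norm_num)]
      simp
    · simp only [hin]
      rw [ih (k + 1)]
      cases hf : fencesFrom ls (k + 1) with
      | nil => rfl
      | cons f t =>
        have hk : k + 1 ≤ f := fencesFrom_le ls (k + 1) f (by simp [hf])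
        have h1 : (f + 1 - k).toNat = (f + 1 - (k + 1)).toNat + 1 := by omega
        simp [h1]

-- A's search with seen = 0 finds the second fence of the list
theorem trimFindRest_zero (ls : List String) (k : Int) :
    trimFindRest ls 0 =
      match fencesFrom ls k with
      | _ :: f1 :: _ => some (ls.drop (f1 + 1 - k).toNat)
      | _ => none := by
  induction ls generalizing k with
  | nil => rfl
  | cons l ls ih =>
    rw [fencesFrom_cons]
    simp only [trimFindRest]
    by_cases hin : PySem.Str.isIn "-----" l = true
    · simp only [hin, if_true, if_neg (show ¬ ((0:Int) + 1 = 2) by norm_num)]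
      rw [show (0:Int) + 1 = 1 from by norm_num, trimFindRest_one ls (k + 1)]
      cases hf : fencesFrom ls (k + 1) with
      | nil => rfl
      | cons f t =>
        have hk : k + 1 ≤ f := fencesFrom_le ls (k + 1) f (by simp [hf])
        have h1 : (f + 1 - k).toNat = (f + 1 - (k + 1)).toNat + 1 := by omega
        simp [h1]
    · simp only [hin]
      rw [ih (k + 1)]
      cases hf : fencesFrom ls (k + 1) with
      | nil => rfl
      | cons f t =>
        cases t with
        | nil => rfl
        | cons f1 t' =>
          have hk : k + 1 ≤ f1 := fencesFrom_le ls (k + 1) f1 (by simp [hf])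
          have h1 : (f1 + 1 - k).toNat = (f1 + 1 - (k + 1)).toNat + 1 := by omega
          simp [h1]

-- equation for B's breaks comprehension on a list of length at least three
theorem breaksFrom_cons₃ (a b c : String) (ls : List String) (k : Int) :
    breaksFrom (a :: b :: c :: ls) k =
      if a = "" ∧ b = "" ∧ c = "" then k :: breaksFrom (b :: c :: ls) (k + 1)
      else breaksFrom (b :: c :: ls) (k + 1) := by
  by_cases h : a = "" ∧ b = "" ∧ c = ""
  · obtain ⟨h1, h2, h3⟩ := h
    subst h1; subst h2; subst h3
    simp [breaksFrom, List.zip_cons_cons, PySem.List.enumerate_cons]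
  · have hne : ¬ (((a, (b, c)) : String × String × String) = ("", "", "")) := by
      simp only [Prod.ext_iff]; tauto
    simp [breaksFrom, List.zip_cons_cons, PySem.List.enumerate_cons, hne, h]

theorem breaksFrom_short (body : List String) (k : Int) (h : body.length ≤ 2) :
    breaksFrom body k = [] := by
  match body with
  | [] => rfl
  | [a] => rfl
  | [a, b] => rfl
  | a :: b :: c :: ls => simp at h

-- B's breaks list starts at the first blank triple
theorem breaksFrom_head (body : List String) (k : Int) :
    (breaksFrom body k).head? = (firstTriple body).map (fun n => k + (n : Int)) := by
  induction body generalizing k with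
  | nil => rfl
  | cons a rest ih =>
    match rest with
    | [] => simp [breaksFrom_short, firstTriple]
    | [b] =>
      have : firstTriple [a, b] = none := by
        simp only [firstTriple]
        split_ifs with h1 h2
        · simp at h1
        · simp at h2
        · rfl
      simp [breaksFrom_short, this]
    | b :: c :: ls =>
      rw [breaksFrom_cons₃]
      have hft0 : firstTriple (a :: b :: c :: ls)
          = if a = "" ∧ (b :: c :: ls).take 2 = ["", ""] then some 0
            else (firstTriple (b :: c :: ls)).map (· + 1) := rfl
      by_cases h : a = "" ∧ b = "" ∧ c = ""
      · have hft : firstTriple (a :: b :: c :: ls) = some 0 := by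
          rw [hft0, if_pos ⟨h.1, by simp [h.2.1, h.2.2]⟩]
        rw [if_pos h, hft]
        simp
      · have hft : firstTriple (a :: b :: c :: ls)
            = (firstTriple (b :: c :: ls)).map (· + 1) := by
          rw [hft0, if_neg (by simpa [List.take, and_assoc] using h)]
        rw [if_neg h, hft, ih (k + 1)]
        cases firstTriple (b :: c :: ls) with
        | none => simp
        | some m => simp; ring

-- the counter loop collects the non-blank lines before the first blank triple
theorem trimCollect_eq_filter_take : ∀ (n : Nat) (ls : List String) (acc : List String),
    ls.length ≤ n →
    trimCollect ls acc 0 =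
      acc ++ (ls.take ((firstTriple ls).getD ls.length)).filter (fun l => decide (l ≠ "")) := by
  intro n
  induction n with
  | zero =>
    intro ls acc h
    have : ls = [] := by cases ls <;> simp_all
    subst this; simp [trimCollect, firstTriple]
  | succ n ih =>
    intro ls acc h
    match ls with
    | [] => simp [trimCollect, firstTriple]
    | l :: ls' =>
      by_cases hl : l = ""
      · subst hl
        match ls' with
        | [] => simp [trimCollect, firstTriple]
        | l2 :: ls'' =>
          by_cases hl2 : l2 = ""
          · subst hl2
            match ls'' with
            | [] => simp [trimCollect, firstTriple]
            | l3 :: ls3 =>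
              by_cases hl3 : l3 = ""
              · subst hl3
                simp [trimCollect, firstTriple]
              · -- "" :: "" :: l3 :: ls3, l3 nonblank
                have e1 : trimCollect ("" :: "" :: l3 :: ls3) acc 0
                    = trimCollect ls3 (acc ++ [l3]) 0 := by
                  simp [trimCollect, hl3]
                have hft : firstTriple ("" :: "" :: l3 :: ls3)
                    = (firstTriple ls3).map (· + 3) := by
                  have s1 : firstTriple ("" :: "" :: l3 :: ls3)
                      = (firstTriple ("" :: l3 :: ls3)).map (· + 1) := by
                    rw [show firstTriple ("" :: "" :: l3 :: ls3)
                        = if ("" : String) = "" ∧ ("" :: l3 :: ls3).take 2 = ["", ""] then some 0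
                          else (firstTriple ("" :: l3 :: ls3)).map (· + 1) from rfl,
                      if_neg (by simp [hl3])]
                  have s2 : firstTriple ("" :: l3 :: ls3)
                      = (firstTriple (l3 :: ls3)).map (· + 1) := by
                    rw [show firstTriple ("" :: l3 :: ls3)
                        = if ("" : String) = "" ∧ (l3 :: ls3).take 2 = ["", ""] then some 0
                          else (firstTriple (l3 :: ls3)).map (· + 1) from rfl,
                      if_neg (by simp [hl3])]
                  have s3 : firstTriple (l3 :: ls3)
                      = (firstTriple ls3).map (· + 1) := by
                    rw [show firstTriple (l3 :: ls3)
                        = if l3 = "" ∧ ls3.take 2 = ["", ""] then some 0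
                          else (firstTriple ls3).map (· + 1) from rfl,
                      if_neg (by simp [hl3])]
                  rw [s1, s2, s3]
                  cases firstTriple ls3 <;> simp
                rw [e1, ih ls3 (acc ++ [l3]) (by simp at h; omega), hft]
                cases firstTriple ls3 with
                | none => simp [hl3]
                | some m => simp [hl3, List.take_succ_cons]
          · -- "" :: l2 :: ls'', l2 nonblank
            have e1 : trimCollect ("" :: l2 :: ls'') acc 0
                = trimCollect ls'' (acc ++ [l2]) 0 := by
              simp [trimCollect, hl2]
            have hft : firstTriple ("" :: l2 :: ls'')
                = (firstTriple ls'').map (· + 2) := by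
              have s1 : firstTriple ("" :: l2 :: ls'')
                  = (firstTriple (l2 :: ls'')).map (· + 1) := by
                rw [show firstTriple ("" :: l2 :: ls'')
                    = if ("" : String) = "" ∧ (l2 :: ls'').take 2 = ["", ""] then some 0
                      else (firstTriple (l2 :: ls'')).map (· + 1) from rfl,
                  if_neg (by simp [hl2])]
              have s2 : firstTriple (l2 :: ls'')
                  = (firstTriple ls'').map (· + 1) := by
                rw [show firstTriple (l2 :: ls'')
                    = if l2 = "" ∧ ls''.take 2 = ["", ""] then some 0
                      else (firstTriple ls'').map (· + 1) from rfl,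
                  if_neg (by simp [hl2])]
              rw [s1, s2]
              cases firstTriple ls'' <;> simp
            rw [e1, ih ls'' (acc ++ [l2]) (by simp at h; omega), hft]
            cases firstTriple ls'' with
            | none => simp [hl2]
            | some m => simp [hl2, List.take_succ_cons]
      · -- l nonblank
        have e1 : trimCollect (l :: ls') acc 0 = trimCollect ls' (acc ++ [l]) 0 := by
          simp [trimCollect, hl]
        have hft : firstTriple (l :: ls') = (firstTriple ls').map (· + 1) := by
          rw [show firstTriple (l :: ls')
              = if l = "" ∧ ls'.take 2 = ["", ""] then some 0
                else (firstTriple ls').map (· + 1) from rfl,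
            if_neg (by simp [hl])]
        rw [e1, ih ls' (acc ++ [l]) (by simp at h; omega), hft]
        cases firstTriple ls' with
        | none => simp [hl]
        | some m => simp [hl, List.take_succ_cons]

-- ===== VERDICT (by name: the statement is the Claim_ definition above) =====
theorem trim_doc_spec : Claim_equal_trim_doc := by
  intro doc _
  unfold Spec_trim_doc trim_doc trim_doc_alt
  dsimp only
  rw [trimLoopA_phase1 _ _ 0 (Or.inl rfl), trimFindRest_zero _ 0]
  have hfe : ∀ ls : List String, ((PySem.List.enumerate ls 0).filter
      (fun p => PySem.Str.isIn "-----" p.2)).map Prod.fst = fencesFrom ls 0 := fun _ => rfl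
  rw [hfe]
  cases hf : fencesFrom (PySem.Str.splitlines doc) 0 with
  | nil => rfl
  | cons f0 t =>
    cases t with
    | nil => rfl
    | cons f1 t' =>
      have hk1 : 0 ≤ f1 := by
        have := fencesFrom_le (PySem.Str.splitlines doc) 0 f1 (by simp [hf]); omega
      set lines := PySem.Str.splitlines doc with hlines
      have hslice : PySem.List.slice lines (some (f1 + 1)) none
          = lines.drop (f1 + 1 - 0).toNat := by
        rw [PySem.List.slice_from _ (by omega)]
        norm_num
      simp only [hslice]
      set body := lines.drop (f1 + 1 - 0).toNat with hbody
      have h1 : PySem.List.slice body (some 1) none = body.drop 1 := by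
        rw [PySem.List.slice_from _ (by norm_num)]; rfl
      have h2 : PySem.List.slice body (some 2) none = body.drop 2 := by
        rw [PySem.List.slice_from _ (by norm_num)]; rfl
      rw [h1, h2]
      have hbr : ((PySem.List.enumerate (body.zip ((body.drop 1).zip (body.drop 2))) 0).filter
          (fun p => decide (p.2 = ("", "", "")))).map Prod.fst = breaksFrom body 0 := rfl
      rw [hbr]
      have hcol := trimCollect_eq_filter_take body.length body [] le_rfl
      rw [hcol]
      have hhead := breaksFrom_head body 0
      cases hb : breaksFrom body 0 with
      | nil =>
        rw [hb] at hhead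
        have hft : firstTriple body = none := by
          cases hft' : firstTriple body
          · rfl
          · rw [hft'] at hhead; simp at hhead
        rw [hft]
        have : PySem.List.slice body none (some (body.length : Int)) = body.take body.length := by
          rw [PySem.List.slice_to _ (by positivity)]; norm_num
        simp [this]
      | cons b bs =>
        rw [hb] at hhead
        cases hft' : firstTriple body with
        | none => rw [hft'] at hhead; simp at hhead
        | some m =>
          rw [hft'] at hhead
          simp at hhead
          have hbm : b = (m : Int) := by omega
          subst hbm
          have : PySem.List.slice body none (some ((m : Nat) : Int)) = body.take m := by
            rw [PySem.List.slice_to _ (by positivity)]; norm_num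
          simp [this]
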